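-- pv_equiv track=rewrite | github.com/pypi-data/pypi-mirror-9 | packages/libK/libK-0.0.43.tar.gz/libK-0.0.43/libK/conv_date.py | conv_date
-- ===== SOURCE A (Python) =====
-- def conv_date(date, delimiter, replace=None):
--     string = ''
--     if not date and not delimiter: return string
--     array = {}
--     buff = date.split(delimiter)
--     i = 0
--     for n in buff:
--         array[i] = n
--         i += 1
--     r = {}
--     for i in range(0, 6):
--         if i in array.keys():
--             if array[i]:
--                 r[i] = array[i]
--             else:
--                 if i == 0:
--                     r[i] = '1970'
--                 elif i in [1, 2]:
--                     r[i] = '01'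
--                 else:
--                     r[i] = '00'
--         else:
--             r[i] = '00'
--     replacements = {0: '-', 1: '-', 2: ' ', 3: ':', 4: ':'}
--     # for r as $k => $d) {
--     for k in r.keys():
--         if replace != None:
--             string += r[k]
--             if k in replace.keys():
--                 string += replace[k]
--             else:
--                 if k in replacements.keys():
--                     string += replacements[k]
--         else:
--             string += r[k]
--             if k in replacements.keys():
--                 string += replacements[k]
--     return string
-- ===== SOURCE B (Python) =====
-- _DEFAULTS = ('1970', '01', '01', '00', '00', '00')
--
-- def conv_date(date, delimiter, replace=None):
--     if not date and not delimiter: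
--         return ''
--     return _fmt(date.split(delimiter), replace, 0)
--
-- def _fmt(buff, replace, i):
--     # recursively build fields 0..5 back-to-front
--     if i == 6:
--         return ''
--     field = (buff[i] or _DEFAULTS[i]) if i < len(buff) else '00'
--     if replace is not None and i in replace:
--         sep = replace[i]
--     elif i < 5:
--         sep = '-- ::'[i]
--     else:
--         sep = ''
--     return field + sep + _fmt(buff, replace, i + 1)
-- ===== Notes on version B (the rewrite author's own statement) =====
-- stated objective: alternative
-- what changed: B replaces A's three staged dict-building loops and key-iterating string concatenation by a single recursive helper that builds the result back-to-front, computing each field directly from the split list and indexing the separator out of the literal string '-- ::'.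
import Mathlib
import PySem

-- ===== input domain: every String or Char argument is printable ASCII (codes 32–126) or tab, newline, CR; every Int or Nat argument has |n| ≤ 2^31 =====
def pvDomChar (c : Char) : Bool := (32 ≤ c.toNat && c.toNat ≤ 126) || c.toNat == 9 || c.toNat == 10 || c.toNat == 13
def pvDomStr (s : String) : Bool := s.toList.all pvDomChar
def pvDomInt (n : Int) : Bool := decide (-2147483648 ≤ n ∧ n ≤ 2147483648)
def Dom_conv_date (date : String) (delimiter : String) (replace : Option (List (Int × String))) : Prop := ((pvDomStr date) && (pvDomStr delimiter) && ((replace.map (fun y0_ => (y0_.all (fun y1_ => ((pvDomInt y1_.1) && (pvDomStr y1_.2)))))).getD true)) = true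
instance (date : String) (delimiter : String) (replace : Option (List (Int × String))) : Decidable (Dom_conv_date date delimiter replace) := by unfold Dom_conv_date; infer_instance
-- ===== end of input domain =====

-- B replaces A's staged dict-building loops and concat pass by one recursive helper
-- building the result back-to-front (objective: alternative; return value only).

-- ===== PORT A =====
def conv_date (date : String) (delimiter : String) (replace : Option (List (Int × String))) : String :=
  if date = "" ∧ delimiter = "" then "" else
  match PySem.Str.split? date delimiter with
  | none => ""          -- date.split('') raises ValueError; excluded by Pre_conv_date
  | some buff =>
    -- array = {0: buff[0], 1: buff[1], …}
    let array := (buff.foldl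
      (fun (p : PySem.Dict Int String × Int) n => (p.1.insert p.2 n, p.2 + 1))
      (PySem.Dict.empty, 0)).1
    -- r[i] for i in range(0, 6): `i in array.keys()` = contains, `if array[i]:` = getD ≠ ""
    let r := (PySem.List.pyRange 0 6 1).foldl
      (fun (rd : PySem.Dict Int String) i =>
        rd.insert i
          (if array.contains i then
            (if array.getD i "" ≠ "" then array.getD i ""
             else if i = 0 then "1970" else if i = 1 ∨ i = 2 then "01" else "00")
           else "00"))
      PySem.Dict.empty
    let replacements : PySem.Dict Int String :=
      PySem.Dict.ofList [(0, "-"), (1, "-"), (2, " "), (3, ":"), (4, ":")]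
    -- `if replace != None:` — in the then-branch replace is read with `replace.getD []`
    r.keys.foldl
      (fun s k =>
        if replace ≠ none then
          let s := s ++ r.getD k ""
          if (PySem.Dict.mk (replace.getD [])).contains k then
            s ++ (PySem.Dict.mk (replace.getD [])).getD k ""
          else if replacements.contains k then s ++ replacements.getD k "" else s
        else
          let s := s ++ r.getD k ""
          if replacements.contains k then s ++ replacements.getD k "" else s)
      ""

-- ===== PORT B =====
-- recursive helper _fmt of Source B; the guard `6 ≤ i` is the totality form of Python's
-- `i == 6` (the helper is only ever called with i ≤ 6)
def conv_date_fmt (buff : List String) (replace : Option (List (Int × String))) (i : Nat) : String :=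
  if 6 ≤ i then "" else
    let field :=
      if (i : Int) < (buff.length : Int) then
        (if PySem.List.pyGetD buff (i : Int) "" ≠ "" then PySem.List.pyGetD buff (i : Int) ""
         else PySem.List.pyGetD ["1970", "01", "01", "00", "00", "00"] (i : Int) "")
      else "00"
    let sep :=
      if replace ≠ none ∧ (PySem.Dict.mk (replace.getD [])).contains (i : Int) then
        (PySem.Dict.mk (replace.getD [])).getD (i : Int) ""
      else if (i : Int) < 5 then
        -- '-- ::'[i]: the index is in range here, so the getD default is never used
        ((PySem.Str.pyGet? "-- ::" (i : Int)).map (fun c => String.ofList [c])).getD ""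
      else ""
    field ++ sep ++ conv_date_fmt buff replace (i + 1)
  termination_by 6 - i
  decreasing_by omega

def conv_date_alt (date : String) (delimiter : String) (replace : Option (List (Int × String))) : String :=
  if date = "" ∧ delimiter = "" then "" else
  match PySem.Str.split? date delimiter with
  | none => ""          -- date.split('') raises ValueError; excluded by Pre_conv_date
  | some buff => conv_date_fmt buff replace 0

-- ===== PRECONDITION & SPEC =====
-- Pre_ excludes exactly the inputs where A raises ValueError ('empty separator'): a non-empty
-- date with an empty delimiter; B raises the same ValueError there.
def Pre_conv_date (date : String) (delimiter : String) (replace : Option (List (Int × String))) : Prop :=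
  delimiter ≠ "" ∨ date = ""
instance (date : String) (delimiter : String) (replace : Option (List (Int × String))) : Decidable (Pre_conv_date date delimiter replace) := by unfold Pre_conv_date; infer_instance

def pvWitness_conv_date : String × String × (Option (List (Int × String))) :=
  ("2020-07-03", "-", some [(2, "/")])

def Spec_conv_date (date : String) (delimiter : String) (replace : Option (List (Int × String))) (out : String) : Prop := out = conv_date_alt date delimiter replace
instance (date : String) (delimiter : String) (replace : Option (List (Int × String))) (out : String) : Decidable (Spec_conv_date date delimiter replace out) := by unfold Spec_conv_date; infer_instance

-- ===== CLAIM (what is proved, stated in full; the proofs are below) =====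
def Claim_equal_conv_date : Prop := ∀ (date : String) (delimiter : String) (replace : Option (List (Int × String))), Dom_conv_date date delimiter replace → Pre_conv_date date delimiter replace → Spec_conv_date date delimiter replace (conv_date date delimiter replace)

-- ===== LEMMAS AND PROOFS =====

-- the field emitted at position i and the separator after it (B's expressions)
def pvField (buff : List String) (i : Int) : String :=
  if i < (buff.length : Int) then
    (if PySem.List.pyGetD buff i "" ≠ "" then PySem.List.pyGetD buff i ""
     else PySem.List.pyGetD ["1970", "01", "01", "00", "00", "00"] i "")
  else "00"

def pvSep (replace : Option (List (Int × String))) (i : Int) : String :=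
  if replace ≠ none ∧ (PySem.Dict.mk (replace.getD [])).contains i then
    (PySem.Dict.mk (replace.getD [])).getD i ""
  else if i < 5 then
    ((PySem.Str.pyGet? "-- ::" i).map (fun c => String.ofList [c])).getD ""
  else ""

def pvE (buff : List String) (replace : Option (List (Int × String))) (i : Int) : List String :=
  [pvField buff i, pvSep replace i]

-- lookups in A's enumeration dict `array` are list lookups
theorem pv_enum_get (buff : List String) (d : PySem.Dict Int String) (j k : Int) :
    ((buff.foldl (fun (p : PySem.Dict Int String × Int) n => (p.1.insert p.2 n, p.2 + 1)) (d, j)).1).get? k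
      = if j ≤ k ∧ k < j + buff.length then buff[(k - j).toNat]? else d.get? k := by
  induction buff generalizing d j with
  | nil => simp
  | cons b bs ih =>
    rw [List.length_cons, List.foldl_cons, ih, PySem.Dict.get?_insert]
    by_cases hk : k = j
    · subst hk
      rw [if_neg (by push_cast; omega), if_pos rfl, if_pos (by push_cast; omega)]
      have h2 : (k - k).toNat = 0 := by omega
      rw [h2, List.getElem?_cons_zero]
    · rw [if_neg hk]
      by_cases h1 : j + 1 ≤ k ∧ k < j + 1 + (bs.length : Int)
      · rw [if_pos h1, if_pos (by push_cast at h1 ⊢; omega)]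
        have h2 : (k - j).toNat = (k - (j + 1)).toNat + 1 := by omega
        rw [h2, List.getElem?_cons_succ]
      · rw [if_neg h1, if_neg (by push_cast at h1 ⊢; omega)]

-- A's dict `r` always has keys 0..5 in order
theorem pv_keys6 (v0 v1 v2 v3 v4 v5 : String) :
    (((((((PySem.Dict.empty : PySem.Dict Int String).insert 0 v0).insert 1 v1).insert 2 v2).insert 3 v3).insert 4 v4).insert 5 v5).keys = [0, 1, 2, 3, 4, 5] := by
  simp [PySem.Dict.keys_insert_of_not_contains, PySem.Dict.contains_insert, PySem.Dict.contains_empty]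

-- the value A stores in r[i] is pvField buff i
theorem pv_field_eq (buff : List String) (i : Int) (h0 : 0 ≤ i) (h6 : i < 6) :
    (if ((buff.foldl (fun (p : PySem.Dict Int String × Int) n => (p.1.insert p.2 n, p.2 + 1)) (PySem.Dict.empty, 0)).1).contains i then
       (if ((buff.foldl (fun (p : PySem.Dict Int String × Int) n => (p.1.insert p.2 n, p.2 + 1)) (PySem.Dict.empty, 0)).1).getD i "" ≠ ""
        then ((buff.foldl (fun (p : PySem.Dict Int String × Int) n => (p.1.insert p.2 n, p.2 + 1)) (PySem.Dict.empty, 0)).1).getD i ""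
        else if i = 0 then "1970" else if i = 1 ∨ i = 2 then "01" else "00")
     else "00") = pvField buff i := by
  have hg : ((buff.foldl (fun (p : PySem.Dict Int String × Int) n => (p.1.insert p.2 n, p.2 + 1)) (PySem.Dict.empty, 0)).1).get? i
      = if 0 ≤ i ∧ i < 0 + (buff.length : Int) then buff[(i - 0).toNat]? else none := by
    rw [pv_enum_get, PySem.Dict.get?_empty]
  simp only [sub_zero, zero_add] at hg
  simp only [PySem.Dict.contains_eq_isSome_get?, PySem.Dict.getD_eq_get?_getD, hg]
  by_cases hlen : i < (buff.length : Int)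
  · have h1 : 0 ≤ i ∧ i < (buff.length : Int) := ⟨h0, hlen⟩
    have hnat : i.toNat < buff.length := by omega
    rw [if_pos h1, List.getElem?_eq_getElem hnat]
    have hdef : (if i = 0 then "1970" else if i = 1 ∨ i = 2 then "01" else "00")
        = PySem.List.pyGetD ["1970", "01", "01", "00", "00", "00"] i "" := by
      interval_cases i <;> decide
    unfold pvField
    rw [if_pos hlen, PySem.List.pyGetD_eq_getElem buff "" h0 hlen, hdef]
    simp
  · have h1 : ¬(0 ≤ i ∧ i < (buff.length : Int)) := by omega
    rw [if_neg h1]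
    unfold pvField
    rw [if_neg hlen]
    simp

-- A's concat loop, element-wise described, equals a flatMap
theorem pv_foldA (ks : List Int) (gA : String → Int → String) (eL : Int → List String) :
    (∀ k ∈ ks, ∀ s : String, (gA s k).toList = s.toList ++ ((eL k).map String.toList).flatten) →
    ∀ s : String, (ks.foldl gA s).toList = s.toList ++ ((ks.flatMap eL).map String.toList).flatten := by
  induction ks with
  | nil => intro _ s; simp
  | cons k ks ih =>
    intro h s
    rw [List.foldl_cons, ih (fun k' hk' s' => h k' (by simp [hk']) s') (gA s k), h k (by simp) s]
    simp

-- B's recursion from i produces the elements i..5 concatenated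
theorem pv_fmt_eq (buff : List String) (replace : Option (List (Int × String))) :
    ∀ i : Nat, i ≤ 6 →
      (conv_date_fmt buff replace i).toList
        = (((PySem.List.pyRange i 6 1).flatMap (pvE buff replace)).map String.toList).flatten := by
  intro i hi
  induction h6 : 6 - i generalizing i with
  | zero =>
    have : i = 6 := by omega
    subst this
    rw [conv_date_fmt]
    simp [PySem.List.pyRange]
  | succ n ih =>
    have hlt : i < 6 := by omega
    rw [conv_date_fmt, if_neg (by omega)]
    have hr : PySem.List.pyRange (i : Int) 6 1 = (i : Int) :: PySem.List.pyRange ((i : Int) + 1) 6 1 := by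
      exact PySem.List.pyRange_one_cons (by exact_mod_cast hlt)
    have hcast : ((i : Int) + 1) = ((i + 1 : Nat) : Int) := by push_cast; ring
    rw [hr, hcast, List.flatMap_cons]
    simp only [String.toList_append]
    rw [ih (i + 1) (by omega) (by omega)]
    simp [pvE, pvField, pvSep, String.toList_append]

set_option maxHeartbeats 1000000 in
theorem pv_body_eq (buff : List String) (replace : Option (List (Int × String))) :
    (let array := (buff.foldl
      (fun (p : PySem.Dict Int String × Int) n => (p.1.insert p.2 n, p.2 + 1))
      (PySem.Dict.empty, 0)).1
    let r := (PySem.List.pyRange 0 6 1).foldl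
      (fun (rd : PySem.Dict Int String) i =>
        rd.insert i
          (if array.contains i then
            (if array.getD i "" ≠ "" then array.getD i ""
             else if i = 0 then "1970" else if i = 1 ∨ i = 2 then "01" else "00")
           else "00"))
      PySem.Dict.empty
    let replacements : PySem.Dict Int String :=
      PySem.Dict.ofList [(0, "-"), (1, "-"), (2, " "), (3, ":"), (4, ":")]
    r.keys.foldl
      (fun s k =>
        if replace ≠ none then
          let s := s ++ r.getD k ""
          if (PySem.Dict.mk (replace.getD [])).contains k then
            s ++ (PySem.Dict.mk (replace.getD [])).getD k ""
          else if replacements.contains k then s ++ replacements.getD k "" else s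
        else
          let s := s ++ r.getD k ""
          if replacements.contains k then s ++ replacements.getD k "" else s)
      "")
    = conv_date_fmt buff replace 0 := by
  have hr6 : PySem.List.pyRange 0 6 1 = [0, 1, 2, 3, 4, 5] := by decide
  have hof : PySem.Dict.ofList [((0 : Int), "-"), (1, "-"), (2, " "), (3, ":"), (4, ":")]
      = PySem.Dict.mk [((0 : Int), "-"), (1, "-"), (2, " "), (3, ":"), (4, ":")] := by decide
  simp only [hr6]
  -- A's r stores pvField buff i at key i
  rw [PySem.List.foldl_congr_mem [0, 1, 2, 3, 4, 5]
    (fun (rd : PySem.Dict Int String) i =>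
        rd.insert i
          (if ((buff.foldl (fun (p : PySem.Dict Int String × Int) n => (p.1.insert p.2 n, p.2 + 1)) (PySem.Dict.empty, 0)).1).contains i then
            (if ((buff.foldl (fun (p : PySem.Dict Int String × Int) n => (p.1.insert p.2 n, p.2 + 1)) (PySem.Dict.empty, 0)).1).getD i "" ≠ ""
             then ((buff.foldl (fun (p : PySem.Dict Int String × Int) n => (p.1.insert p.2 n, p.2 + 1)) (PySem.Dict.empty, 0)).1).getD i ""
             else if i = 0 then "1970" else if i = 1 ∨ i = 2 then "01" else "00")
           else "00"))
    (fun (rd : PySem.Dict Int String) i => rd.insert i (pvField buff i))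
    PySem.Dict.empty
    (by
      intro rd i hi
      have h06 : 0 ≤ i ∧ i < 6 := by
        simp only [List.mem_cons, List.not_mem_nil, or_false] at hi
        rcases hi with h | h | h | h | h | h <;> subst h <;> norm_num
      exact congrArg (rd.insert i) (pv_field_eq buff i h06.1 h06.2))]
  simp only [List.foldl_cons, List.foldl_nil]
  rw [pv_keys6]
  apply String.ext
  have hA := pv_foldA [0, 1, 2, 3, 4, 5]
    (fun s k =>
      if replace ≠ none then
        let s := s ++ (((((((PySem.Dict.empty : PySem.Dict Int String).insert 0 (pvField buff 0)).insert 1 (pvField buff 1)).insert 2 (pvField buff 2)).insert 3 (pvField buff 3)).insert 4 (pvField buff 4)).insert 5 (pvField buff 5)).getD k ""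
        if (PySem.Dict.mk (replace.getD [])).contains k then
          s ++ (PySem.Dict.mk (replace.getD [])).getD k ""
        else if (PySem.Dict.ofList [((0 : Int), "-"), (1, "-"), (2, " "), (3, ":"), (4, ":")]).contains k then
          s ++ (PySem.Dict.ofList [((0 : Int), "-"), (1, "-"), (2, " "), (3, ":"), (4, ":")]).getD k "" else s
      else
        let s := s ++ (((((((PySem.Dict.empty : PySem.Dict Int String).insert 0 (pvField buff 0)).insert 1 (pvField buff 1)).insert 2 (pvField buff 2)).insert 3 (pvField buff 3)).insert 4 (pvField buff 4)).insert 5 (pvField buff 5)).getD k ""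
        if (PySem.Dict.ofList [((0 : Int), "-"), (1, "-"), (2, " "), (3, ":"), (4, ":")]).contains k then
          s ++ (PySem.Dict.ofList [((0 : Int), "-"), (1, "-"), (2, " "), (3, ":"), (4, ":")]).getD k "" else s)
    (pvE buff replace)
    (by
      intro k hk s
      rcases replace with _ | rep <;> fin_cases hk <;>
        · simp only [pvE, pvSep, hof]
          simp [PySem.Dict.getD_eq_get?_getD, PySem.Dict.get?_insert, PySem.Dict.get?_empty,
            PySem.Dict.contains_mk, PySem.Dict.get?_mk_cons, PySem.List.pyGetD,
            PySem.List.pyGet?, PySem.List.pyIdx?, String.toList_append, apply_ite String.toList]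
          try (split_ifs <;> simp_all [String.toList_append])
          try decide) ""
  rw [hA, pv_fmt_eq buff replace 0 (by omega)]
  have h06 : PySem.List.pyRange ((0 : Nat) : Int) 6 1 = [0, 1, 2, 3, 4, 5] := by decide
  rw [h06]
  simp

-- ===== VERDICT (by name: the statement is the Claim_ definition above) =====
theorem conv_date_spec : Claim_equal_conv_date := by
  intro date delimiter replace _ _
  unfold Spec_conv_date conv_date conv_date_alt
  by_cases hde : date = "" ∧ delimiter = ""
  · rw [if_pos hde, if_pos hde]
  · rw [if_neg hde, if_neg hde]
    cases h : PySem.Str.split? date delimiter with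
    | none => rfl
    | some buff => exact pv_body_eq buff replace
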